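-- pv_equiv track=rewrite | github.com/vinchinzu/euler | python/333.py | enumerate_special_sums
-- ===== SOURCE A (Python) =====
-- from typing import Dict, List, Tuple
--
-- def generate_terms(limit: int) -> List[Tuple[int, int, int]]:
--     """Return (value, exp2, exp3) for all 2**exp2 * 3**exp3 <= limit, excluding 1."""
--
--     terms: List[Tuple[int, int, int]] = []
--     value2 = 1
--     exp2 = 0
--     while value2 <= limit:
--         value3 = value2
--         exp3 = 0
--         while value3 <= limit:
--             if value3 > 1:
--                 terms.append((value3, exp2, exp3))
--             value3 *= 3
--             exp3 += 1
--         value2 *= 2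
--         exp2 += 1
--
--     terms.sort(key=lambda item: (item[1], -item[2]))  # exp2 asc, exp3 desc
--     return terms
--
-- def enumerate_special_sums(limit: int) -> List[int]:
--     """Enumerate sums obtainable by special partitions up to ``limit``."""
--
--     terms = generate_terms(limit)
--     if not terms:
--         return [0] * (limit + 1)
--
--     values = [term[0] for term in terms]
--     exp2 = [term[1] for term in terms]
--     exp3 = [term[2] for term in terms]
--     n = len(terms)
--
--     predecessors: List[List[int]] = [[] for _ in range(n)]
--     for j in range(n):
--         exp2_j = exp2[j]
--         exp3_j = exp3[j]
--         for i in range(j):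
--             if exp2[i] < exp2_j and exp3[i] > exp3_j:
--                 predecessors[j].append(i)
--
--     counts = [0] * (limit + 1)
--     dp: List[Dict[int, int]] = [{} for _ in range(n)]
--
--     for idx in range(n):
--         value = values[idx]
--         current: Dict[int, int] = {}
--         if value <= limit:
--             current[value] = 1
--
--         for pred in predecessors[idx]:
--             for sum_value, ways in dp[pred].items():
--                 new_sum = sum_value + value
--                 if new_sum > limit:
--                     continue
--                 current[new_sum] = current.get(new_sum, 0) + ways
--
--         dp[idx] = current
--         for sum_value, ways in current.items():
--             counts[sum_value] += ways
--
--     return counts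
-- ===== SOURCE B (Python) =====
-- from typing import Dict, List, Tuple
--
-- def enumerate_special_sums(limit: int) -> List[int]:
--     """Enumerate sums obtainable by special partitions up to ``limit``."""
--
--     counts = [0] * (limit + 1)
--     # states[b] = {sum: ways} over all chains built so far whose last term has exp3 == b
--     states: Dict[int, Dict[int, int]] = {}
--     power2 = 1
--     while power2 <= limit:
--         # chains gaining their last term at this exp2 level (exp2 strictly larger
--         # than every earlier term's, so extensions may only use previous levels)
--         new_entries: List[Tuple[int, int, int]] = []  # (exp3, sum, ways)
--         value = power2
--         exp3 = 0
--         while value <= limit: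
--             if value > 1:
--                 new_entries.append((exp3, value, 1))
--                 for prev_exp3, sums in states.items():
--                     if prev_exp3 > exp3:
--                         for prev_sum, ways in sums.items():
--                             new_sum = prev_sum + value
--                             if new_sum <= limit:
--                                 new_entries.append((exp3, new_sum, ways))
--             value *= 3
--             exp3 += 1
--         for exp3, chain_sum, ways in new_entries:
--             counts[chain_sum] += ways
--             bucket = states.setdefault(exp3, {})
--             bucket[chain_sum] = bucket.get(chain_sum, 0) + ways
--         power2 *= 2
--     return counts
-- ===== Notes on version B (the rewrite author's own statement) =====
-- stated objective: alternative
-- what changed: B drops A's explicit sorted term list, predecessor DAG and per-node sum->ways dicts, and instead runs one pass over exp2 levels keeping a single DP state keyed by the chain's last exp3 (sum->ways per key), extending only from strictly larger exp3 keys of previous levels.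
import Mathlib
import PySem

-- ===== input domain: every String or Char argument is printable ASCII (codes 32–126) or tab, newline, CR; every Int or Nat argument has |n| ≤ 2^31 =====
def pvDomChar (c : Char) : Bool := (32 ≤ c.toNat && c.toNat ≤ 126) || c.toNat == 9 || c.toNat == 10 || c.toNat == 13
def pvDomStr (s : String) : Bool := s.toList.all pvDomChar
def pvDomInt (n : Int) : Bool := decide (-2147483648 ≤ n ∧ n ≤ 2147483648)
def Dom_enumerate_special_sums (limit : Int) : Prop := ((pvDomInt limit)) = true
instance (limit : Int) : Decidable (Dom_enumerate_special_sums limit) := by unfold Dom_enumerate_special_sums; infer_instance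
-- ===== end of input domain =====

-- B replaces A's explicit term list + predecessor DAG + per-node path DP by a per-exp2-level DP
-- keyed by the chain's last exp3 (objective: alternative decomposition, same asymptotic cost).

-- ===== PORT A =====
-- inner 'while value3 <= limit' of generate_terms (0 < value3 justifies termination; always holds in A)
def genTermsInner (limit value3 exp2 exp3 : Int) (acc : List (Int × Int × Int))
    (h : 0 < value3) : List (Int × Int × Int) :=
  if _hle : value3 ≤ limit then
    genTermsInner limit (value3 * 3) exp2 (exp3 + 1)
      (if 1 < value3 then acc ++ [(value3, exp2, exp3)] else acc) (by omega)
  else acc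
termination_by (limit + 1 - value3).toNat
decreasing_by omega

-- outer 'while value2 <= limit' of generate_terms
def genTermsOuter (limit value2 exp2 : Int) (acc : List (Int × Int × Int))
    (h : 0 < value2) : List (Int × Int × Int) :=
  if _hle : value2 ≤ limit then
    genTermsOuter limit (value2 * 2) (exp2 + 1) (genTermsInner limit value2 exp2 0 acc h) (by omega)
  else acc
termination_by (limit + 1 - value2).toNat
decreasing_by omega

def generate_terms (limit : Int) : List (Int × Int × Int) :=
  PySem.List.sorted2 (genTermsOuter limit 1 0 [] one_pos) (fun t => t.2.1) (fun t => -t.2.2)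

def enumerate_special_sums (limit : Int) : List Int :=
  let terms := generate_terms limit
  if terms = [] then List.replicate (limit + 1).toNat 0
  else
    let values := terms.map (fun t => t.1)
    let exp2 := terms.map (fun t => t.2.1)
    let exp3 := terms.map (fun t => t.2.2)
    let n : Int := PySem.List.len terms
    let predecessors : List (List Int) :=
      (PySem.List.pyRange 0 n 1).map (fun j =>
        (PySem.List.pyRange 0 j 1).foldl (fun acc i =>
          if PySem.List.pyGetD exp2 i 0 < PySem.List.pyGetD exp2 j 0 ∧
             PySem.List.pyGetD exp3 i 0 > PySem.List.pyGetD exp3 j 0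
          then acc ++ [i] else acc) [])
    let counts0 : List Int := List.replicate (limit + 1).toNat 0
    let final := (PySem.List.pyRange 0 n 1).foldl
      (fun (st : List Int × List (PySem.Dict Int Int)) idx =>
        let value := PySem.List.pyGetD values idx 0
        let current : PySem.Dict Int Int :=
          if value ≤ limit then (PySem.Dict.empty).insert value 1 else PySem.Dict.empty
        let current := (PySem.List.pyGetD predecessors idx []).foldl (fun cur pred =>
          (PySem.List.pyGetD st.2 pred PySem.Dict.empty).items.foldl (fun cur sw =>
            if sw.1 + value > limit then cur
            else cur.insert (sw.1 + value) (cur.getD (sw.1 + value) 0 + sw.2)) cur) current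
        let counts := current.items.foldl (fun c sw =>
          PySem.List.pySetD c sw.1 (PySem.List.pyGetD c sw.1 0 + sw.2)) st.1
        (counts, st.2 ++ [current]))
      (counts0, ([] : List (PySem.Dict Int Int)))
    final.1

-- ===== PORT B =====
-- inner 'while value <= limit' of B: collect this level's (exp3, sum, ways) entries
def altLevelEntries (limit value exp3 : Int) (states : PySem.Dict Int (PySem.Dict Int Int))
    (acc : List (Int × Int × Int)) (h : 0 < value) : List (Int × Int × Int) :=
  if _hle : value ≤ limit then
    altLevelEntries limit (value * 3) (exp3 + 1) states
      (if 1 < value then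
        states.items.foldl (fun es pd =>
          if pd.1 > exp3 then
            pd.2.items.foldl (fun es2 sw =>
              if sw.1 + value ≤ limit then es2 ++ [(exp3, sw.1 + value, sw.2)] else es2) es
          else es) (acc ++ [(exp3, value, 1)])
       else acc) (by omega)
  else acc
termination_by (limit + 1 - value).toNat
decreasing_by omega

-- outer 'while power2 <= limit' of B
def altOuter (limit power2 : Int) (counts : List Int)
    (states : PySem.Dict Int (PySem.Dict Int Int)) (h : 0 < power2) : List Int :=
  if _hle : power2 ≤ limit then
    let newEntries := altLevelEntries limit power2 0 states [] h
    let st := newEntries.foldl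
      (fun (st : List Int × PySem.Dict Int (PySem.Dict Int Int)) e =>
        (PySem.List.pySetD st.1 e.2.1 (PySem.List.pyGetD st.1 e.2.1 0 + e.2.2),
         st.2.modify e.1 PySem.Dict.empty (fun d => d.insert e.2.1 (d.getD e.2.1 0 + e.2.2))))
      (counts, states)
    altOuter limit (power2 * 2) st.1 st.2 (by omega)
  else counts
termination_by (limit + 1 - power2).toNat
decreasing_by omega

def enumerate_special_sums_alt (limit : Int) : List Int :=
  altOuter limit 1 (List.replicate (limit + 1).toNat 0) PySem.Dict.empty one_pos

-- ===== PRECONDITION & SPEC =====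
def Spec_enumerate_special_sums (limit : Int) (out : List Int) : Prop := out = enumerate_special_sums_alt limit
instance (limit : Int) (out : List Int) : Decidable (Spec_enumerate_special_sums limit out) := by unfold Spec_enumerate_special_sums; infer_instance

-- ===== CLAIM (what is proved, stated in full; the proofs are below) =====
def Claim_equal_enumerate_special_sums : Prop := ∀ (limit : Int), Dom_enumerate_special_sums limit → Spec_enumerate_special_sums limit (enumerate_special_sums limit)

-- ===== LEMMAS AND PROOFS =====

-- generic accounting lemmas

def massD (l : List (Int × Int)) (t : Int) : Int := (l.map (fun p => if p.1 = t then p.2 else 0)).sum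
def massE (l : List (Int × Int × Int)) (b u : Int) : Int :=
  (l.map (fun e => if e.1 = b ∧ e.2.1 = u then e.2.2 else 0)).sum

theorem massD_cons (p : Int × Int) (l : List (Int × Int)) (t : Int) :
    massD (p :: l) t = (if p.1 = t then p.2 else 0) + massD l t := by simp [massD]

theorem sum_ite_key {α : Type} [DecidableEq α] (K : List α) (hK : K.Nodup) (a : α) (h : α → Int) :
    (K.map (fun k => if k = a then h k else 0)).sum = if a ∈ K then h a else 0 := by
  induction K with
  | nil => simp
  | cons k K ih =>
    simp only [List.nodup_cons] at hK
    by_cases hk : k = a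
    · subst hk; simp [hK.1, ih hK.2]
    · simp only [List.map_cons, List.sum_cons, if_neg hk, ih hK.2, zero_add, List.mem_cons]
      by_cases ha : a ∈ K <;> simp [ha, Ne.symm hk]

theorem not_contains_of_not_mem_keys (d : PySem.Dict Int Int) (t : Int) (ht : t ∉ d.keys) :
    d.contains t = false := by
  by_cases h : d.contains t
  · exact absurd ((PySem.Dict.contains_iff_mem_keys d t).mp h) ht
  · simpa using h

theorem massD_items (d : PySem.Dict Int Int) (hnd : d.keys.Nodup) (t : Int) :
    massD d.items t = d.getD t 0 := by
  rw [PySem.Dict.items_eq_map_keys d hnd 0]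
  unfold massD
  rw [List.map_map]
  have he : ((fun p : Int × Int => if p.1 = t then p.2 else 0) ∘ fun k => (k, d.getD k 0))
      = fun k => if k = t then d.getD k 0 else 0 := by funext k; simp
  rw [he, sum_ite_key d.keys hnd t (fun k => d.getD k 0)]
  by_cases ht : t ∈ d.keys
  · simp [ht]
  · rw [if_neg ht, PySem.Dict.getD_of_not_contains]
    exact not_contains_of_not_mem_keys d t ht

-- counts update by an entry list: counts[s] += w for (s, w) in l
theorem counts_fold_length (l : List (Int × Int)) (c : List Int) :
    (l.foldl (fun c p => PySem.List.pySetD c p.1 (PySem.List.pyGetD c p.1 0 + p.2)) c).length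
      = c.length := by
  induction l generalizing c with
  | nil => rfl
  | cons p l ih => rw [List.foldl_cons, ih]; exact PySem.List.length_pySetD _ _ _

theorem counts_fold_getD (l : List (Int × Int)) (c : List Int)
    (hb : ∀ p ∈ l, 0 ≤ p.1 ∧ p.1 < (c.length : Int)) (t : Nat) (ht : t < c.length) :
    (l.foldl (fun c p => PySem.List.pySetD c p.1 (PySem.List.pyGetD c p.1 0 + p.2)) c).getD t 0
      = c.getD t 0 + massD l (t : Int) := by
  induction l generalizing c with
  | nil => simp [massD]
  | cons p l ih =>
    have hp := hb p (by simp)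
    rw [List.foldl_cons, massD_cons]
    have hset : PySem.List.pySetD c p.1 (PySem.List.pyGetD c p.1 0 + p.2)
        = c.set p.1.toNat (PySem.List.pyGetD c p.1 0 + p.2) :=
      PySem.List.pySetD_of_nonneg c _ hp.1
    rw [hset, ih _ (fun q hq => by
        have := hb q (List.mem_cons_of_mem _ hq); simpa [List.length_set] using this)
      (by simpa [List.length_set] using ht)]
    have hg : PySem.List.pyGetD c p.1 0 = c.getD p.1.toNat 0 := by
      rw [PySem.List.pyGetD_eq_getElem c 0 hp.1 (by exact_mod_cast hp.2)]
      rw [List.getD_eq_getElem c 0 (by omega)]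
    by_cases hpt : p.1 = (t : Int)
    · have : p.1.toNat = t := by omega
      rw [if_pos hpt]
      rw [List.getD_eq_getElem _ 0 (by simpa [List.length_set] using ht),
          List.getElem_set, if_pos this, hg, this,
          List.getD_eq_getElem c 0 ht]
      ring
    · have : p.1.toNat ≠ t := by omega
      rw [if_neg hpt]
      rw [List.getD_eq_getElem _ 0 (by simpa [List.length_set] using ht),
          List.getElem_set, if_neg this, List.getD_eq_getElem c 0 ht]
      ring

-- B's states merge: per-(b,u) characterization
theorem states_fold_getD (l : List (Int × Int × Int)) (st : PySem.Dict Int (PySem.Dict Int Int))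
    (b u : Int) :
    (((l.foldl (fun s (e : Int × Int × Int) =>
        s.modify e.1 PySem.Dict.empty (fun d => d.insert e.2.1 (d.getD e.2.1 0 + e.2.2))) st).getD
        b PySem.Dict.empty).getD u 0)
      = (st.getD b PySem.Dict.empty).getD u 0 + massE l b u := by
  induction l generalizing st with
  | nil => simp [massE]
  | cons e l ih =>
    rw [List.foldl_cons, ih]
    rw [PySem.Dict.getD_modify]
    simp only [massE, List.map_cons, List.sum_cons]
    by_cases hb : b = e.1
    · subst hb
      rw [if_pos rfl, PySem.Dict.getD_insert]
      by_cases hu : u = e.2.1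
      · subst hu
        rw [if_pos rfl, if_pos ⟨rfl, rfl⟩]; ring
      · rw [if_neg hu, if_neg (by intro hc; exact hu hc.2.symm)]; ring
    · rw [if_neg hb, if_neg (by intro hc; exact hb hc.1.symm)]; ring

theorem states_fold_inner_nodup (l : List (Int × Int × Int)) (st : PySem.Dict Int (PySem.Dict Int Int))
    (h : ∀ b : Int, ((st.getD b PySem.Dict.empty).keys).Nodup) :
    ∀ b : Int, (((l.foldl (fun s (e : Int × Int × Int) =>
        s.modify e.1 PySem.Dict.empty (fun d => d.insert e.2.1 (d.getD e.2.1 0 + e.2.2))) st).getD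
        b PySem.Dict.empty).keys).Nodup := by
  induction l generalizing st with
  | nil => exact h
  | cons e l ih =>
    rw [List.foldl_cons]
    refine ih _ (fun b => ?_)
    rw [PySem.Dict.getD_modify]
    by_cases hb : b = e.1
    · rw [if_pos hb]; exact PySem.Dict.nodup_keys_insert _ _ _ (h e.1)
    · rw [if_neg hb]; exact h b

theorem states_fold_inner_keys (l : List (Int × Int × Int)) (st : PySem.Dict Int (PySem.Dict Int Int))
    (b : Int) :
    ∀ s ∈ (((l.foldl (fun s (e : Int × Int × Int) =>
        s.modify e.1 PySem.Dict.empty (fun d => d.insert e.2.1 (d.getD e.2.1 0 + e.2.2))) st).getD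
        b PySem.Dict.empty).keys),
      s ∈ (st.getD b PySem.Dict.empty).keys ∨ ∃ e ∈ l, e.1 = b ∧ e.2.1 = s := by
  induction l generalizing st with
  | nil => exact fun s hs => Or.inl hs
  | cons e l ih =>
    intro s hs
    rw [List.foldl_cons] at hs
    rcases ih _ s hs with hmem | ⟨e', he', h1, h2⟩
    · rw [PySem.Dict.getD_modify] at hmem
      by_cases hb : b = e.1
      · rw [if_pos hb] at hmem
        rcases (PySem.Dict.mem_keys_insert _ _ _ _).mp hmem with h | h
        · exact Or.inr ⟨e, by simp, hb.symm, h.symm⟩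
        · exact Or.inl (hb ▸ h)
      · rw [if_neg hb] at hmem; exact Or.inl hmem
    · exact Or.inr ⟨e', by simp [he'], h1, h2⟩

-- A's per-predecessor inner fold (guarded insert-add over a dict's items)
theorem predStep_getD (items : List (Int × Int)) (v limit : Int) (cur : PySem.Dict Int Int) (t : Int) :
    ((items.foldl (fun cur (sw : Int × Int) => if sw.1 + v > limit then cur
        else cur.insert (sw.1 + v) (cur.getD (sw.1 + v) 0 + sw.2)) cur).getD t 0)
      = cur.getD t 0 + (items.map (fun sw => if sw.1 + v = t ∧ t ≤ limit then sw.2 else 0)).sum := by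
  induction items generalizing cur with
  | nil => simp
  | cons sw items ih =>
    rw [List.foldl_cons, ih]
    simp only [List.map_cons, List.sum_cons]
    by_cases hg : sw.1 + v > limit
    · rw [if_pos hg, if_neg (by rintro ⟨h1, h2⟩; omega)]; ring
    · rw [if_neg hg, PySem.Dict.getD_insert]
      by_cases ht : t = sw.1 + v
      · subst ht
        rw [if_pos rfl, if_pos (by exact ⟨rfl, by omega⟩)]; ring
      · rw [if_neg ht, if_neg (by rintro ⟨h1, h2⟩; exact ht h1.symm)]; ring

theorem predStep_nodup (items : List (Int × Int)) (v limit : Int) (cur : PySem.Dict Int Int)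
    (h : cur.keys.Nodup) :
    ((items.foldl (fun cur (sw : Int × Int) => if sw.1 + v > limit then cur
        else cur.insert (sw.1 + v) (cur.getD (sw.1 + v) 0 + sw.2)) cur).keys).Nodup := by
  induction items generalizing cur with
  | nil => exact h
  | cons sw items ih =>
    rw [List.foldl_cons]
    refine ih _ ?_
    by_cases hg : sw.1 + v > limit
    · rwa [if_pos hg]
    · rw [if_neg hg]; exact PySem.Dict.nodup_keys_insert _ _ _ h

theorem predStep_keys (items : List (Int × Int)) (v limit : Int) (cur : PySem.Dict Int Int) :
    ∀ k ∈ ((items.foldl (fun cur (sw : Int × Int) => if sw.1 + v > limit then cur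
        else cur.insert (sw.1 + v) (cur.getD (sw.1 + v) 0 + sw.2)) cur).keys),
      k ∈ cur.keys ∨ ∃ sw ∈ items, k = sw.1 + v ∧ k ≤ limit := by
  induction items generalizing cur with
  | nil => exact fun k hk => Or.inl hk
  | cons sw items ih =>
    intro k hk
    rw [List.foldl_cons] at hk
    rcases ih _ k hk with hmem | ⟨sw', h1, h2, h3⟩
    · by_cases hg : sw.1 + v > limit
      · rw [if_pos hg] at hmem; exact Or.inl hmem
      · rw [if_neg hg] at hmem
        rcases (PySem.Dict.mem_keys_insert _ _ _ _).mp hmem with h | h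
        · exact Or.inr ⟨sw, by simp, h, by omega⟩
        · exact Or.inl h
    · exact Or.inr ⟨sw', by simp [h1], h2, h3⟩

-- mass of a dict's items shifted by v and capped at limit
theorem shifted_mass (d : PySem.Dict Int Int) (hnd : d.keys.Nodup) (v t limit : Int) :
    (d.items.map (fun sw => if sw.1 + v = t ∧ t ≤ limit then sw.2 else 0)).sum
      = if t ≤ limit then d.getD (t - v) 0 else 0 := by
  by_cases ht : t ≤ limit
  · rw [if_pos ht, ← massD_items d hnd (t - v)]
    unfold massD
    congr 1
    refine List.map_congr_left (fun sw _ => ?_)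
    by_cases h : sw.1 + v = t
    · rw [if_pos ⟨h, ht⟩, if_pos (by omega)]
    · rw [if_neg (by rintro ⟨h1, _⟩; exact h h1), if_neg (by omega)]
  · rw [if_neg ht]
    rw [List.sum_eq_zero]
    intro x hx
    rcases List.mem_map.mp hx with ⟨sw, _, rfl⟩
    rw [if_neg (by rintro ⟨_, h2⟩; exact ht h2)]

-- regroup a filtered sum over I by key values drawn from a nodup list K
theorem sum_partition {ι : Type} (I : List ι) (K : List Int) (hK : K.Nodup)
    (f : ι → Int) (hf : ∀ i ∈ I, f i ∈ K) (P : Int → Prop) [DecidablePred P] (g : ι → Int) :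
    (I.map (fun i => if P (f i) then g i else 0)).sum
      = (K.map (fun k => if P k then (I.map (fun i => if f i = k then g i else 0)).sum else 0)).sum := by
  induction I with
  | nil => simp
  | cons i I ih =>
    simp only [List.map_cons, List.sum_cons]
    rw [ih (fun j hj => hf j (List.mem_cons_of_mem _ hj))]
    have hsplit : (K.map (fun k => if P k then (if f i = k then g i else 0)
          + ((I.map (fun j => if f j = k then g j else 0)).sum) else 0)).sum
        = (K.map (fun k => if k = f i then (if P k then g i else 0) else 0)).sum
          + (K.map (fun k => if P k then (I.map (fun j => if f j = k then g j else 0)).sum else 0)).sum := by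
      rw [← PySem.List.sum_map_add_int]
      congr 1
      refine List.map_congr_left (fun k _ => ?_)
      by_cases hik : k = f i
      · subst hik
        by_cases hPk : P (f i) <;> simp [hPk]
      · have hik' : f i ≠ k := fun h => hik h.symm
        by_cases hPk : P k <;> simp [hPk, hik, hik']
    rw [hsplit]
    congr 1
    rw [sum_ite_key K hK (f i) (fun k => if P k then g i else 0), if_pos (hf i (by simp))]



-- == shared level structure: the (exp3, value) blocks of one exp2 level, exp3 ascending ==
def blocksL (limit v b : Int) (h : 0 < v) : List (Int × Int) :=
  if _hle : v ≤ limit then (if 1 < v then [(b, v)] else []) ++ blocksL limit (v * 3) (b + 1) (by omega)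
  else []
termination_by (limit + 1 - v).toNat
decreasing_by omega

def levelsL (limit v2 e2 : Int) (h : 0 < v2) : List (Int × List (Int × Int)) :=
  if _hle : v2 ≤ limit then (e2, blocksL limit v2 0 h) :: levelsL limit (v2 * 2) (e2 + 1) (by omega)
  else []
termination_by (limit + 1 - v2).toNat
decreasing_by omega

theorem genTermsInner_eq (limit v e2 b : Int) (acc : List (Int × Int × Int)) (h : 0 < v) :
    genTermsInner limit v e2 b acc h
      = acc ++ (blocksL limit v b h).map (fun p => (p.2, e2, p.1)) := by
  fun_induction genTermsInner limit v e2 b acc h with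
  | case1 v b acc h hle ih =>
    rw [blocksL, dif_pos hle]
    by_cases hv : 1 < v
    · simp only [if_pos hv, dif_pos hv] at ih ⊢
      rw [ih]; simp
    · simp only [if_neg hv, dif_neg hv] at ih ⊢
      rw [ih]; simp
  | case2 v b acc h hle =>
    rw [blocksL, dif_neg hle]; simp

def extEntries (limit : Int) (states : PySem.Dict Int (PySem.Dict Int Int)) (b v : Int) :
    List (Int × Int × Int) :=
  states.items.flatMap (fun pd =>
    if pd.1 > b then
      (pd.2.items.filter (fun sw => decide (sw.1 + v ≤ limit))).map (fun sw => (b, sw.1 + v, sw.2))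
    else [])

theorem altLevelEntries_eq_aux (fuel : Nat) :
    ∀ (limit v b : Int) (states : PySem.Dict Int (PySem.Dict Int Int))
      (acc : List (Int × Int × Int)) (h : 0 < v), (limit + 1 - v).toNat ≤ fuel →
    altLevelEntries limit v b states acc h
      = acc ++ (blocksL limit v b h).flatMap
          (fun p => (p.1, p.2, 1) :: extEntries limit states p.1 p.2) := by
  induction fuel with
  | zero =>
    intro limit v b states acc h hf
    have hle : ¬ v ≤ limit := by omega
    rw [altLevelEntries, dif_neg hle, blocksL, dif_neg hle]
    simp
  | succ n ihn =>
    intro limit v b states acc h hf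
    rw [altLevelEntries, blocksL]
    by_cases hle : v ≤ limit
    · rw [dif_pos hle, dif_pos hle, ihn limit (v * 3) (b + 1) states _ (by omega) (by omega)]
      by_cases hv : 1 < v
      · simp only [if_pos hv]
        have hstep : (fun (es : List (Int × Int × Int)) (pd : Int × PySem.Dict Int Int) =>
              if pd.1 > b then
                pd.2.items.foldl (fun es2 sw =>
                  if sw.1 + v ≤ limit then es2 ++ [(b, sw.1 + v, sw.2)] else es2) es
              else es)
            = (fun es pd => es ++ (if pd.1 > b then
                (pd.2.items.filter (fun sw => decide (sw.1 + v ≤ limit))).map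
                  (fun sw => (b, sw.1 + v, sw.2)) else [])) := by
          funext es pd
          by_cases hpd : pd.1 > b
          · rw [if_pos hpd, if_pos hpd,
              PySem.List.foldl_append_ite (fun sw : Int × Int => sw.1 + v ≤ limit)
                (fun sw => (b, sw.1 + v, sw.2))]
          · simp [hpd]
        rw [hstep, PySem.List.foldl_append_eq_flatMap]
        simp [extEntries]
      · simp [hv]
    · rw [dif_neg hle, dif_neg hle]
      simp

theorem altLevelEntries_eq (limit v b : Int) (states : PySem.Dict Int (PySem.Dict Int Int))
    (acc : List (Int × Int × Int)) (h : 0 < v) :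
    altLevelEntries limit v b states acc h
      = acc ++ (blocksL limit v b h).flatMap
          (fun p => (p.1, p.2, 1) :: extEntries limit states p.1 p.2) :=
  altLevelEntries_eq_aux (limit + 1 - v).toNat limit v b states acc h le_rfl

theorem blocksL_bounds (limit v b : Int) (h : 0 < v) :
    ∀ p ∈ blocksL limit v b h, 1 < p.2 ∧ p.2 ≤ limit ∧ b ≤ p.1 ∧ p.1 ≤ b + (limit - v) := by
  fun_induction blocksL limit v b h with
  | case1 v b h hle ih =>
    intro p hp
    rw [List.mem_append] at hp
    rcases hp with hp | hp
    · by_cases hv : 1 < v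
      · rw [if_pos hv, List.mem_singleton] at hp
        subst hp
        exact ⟨hv, hle, le_refl _, by omega⟩
      · rw [if_neg hv] at hp; simp at hp
    · have := ih p hp
      exact ⟨this.1, this.2.1, by omega, by omega⟩
  | case2 => simp

theorem blocksL_pairwise (limit v b : Int) (h : 0 < v) :
    (blocksL limit v b h).Pairwise (fun p q => p.1 < q.1) := by
  fun_induction blocksL limit v b h with
  | case1 v b h hle ih =>
    refine List.pairwise_append.mpr ⟨?_, ih, ?_⟩
    · by_cases hv : 1 < v <;> simp [hv]
    · intro p hp q hq
      have hq' := blocksL_bounds limit (v * 3) (b + 1) (by omega) q hq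
      have hp' : p.1 = b := by
        by_cases hv : 1 < v
        · rw [if_pos hv, List.mem_singleton] at hp; subst hp; rfl
        · rw [if_neg hv] at hp; simp at hp
      omega
  | case2 => simp

theorem genTermsOuter_eq (limit v2 e2 : Int) (acc : List (Int × Int × Int)) (h : 0 < v2) :
    genTermsOuter limit v2 e2 acc h
      = acc ++ (levelsL limit v2 e2 h).flatMap
          (fun lv => (lv.2).map (fun p => (p.2, lv.1, p.1))) := by
  fun_induction genTermsOuter limit v2 e2 acc h with
  | case1 v2 e2 acc h hle ih =>
    rw [levelsL, dif_pos hle, ih, genTermsInner_eq]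
    simp
  | case2 v2 e2 acc h hle =>
    rw [levelsL, dif_neg hle]; simp

theorem levelsL_fst (limit v2 e2 : Int) (h : 0 < v2) :
    ∀ lv ∈ levelsL limit v2 e2 h, e2 ≤ lv.1 := by
  fun_induction levelsL limit v2 e2 h with
  | case1 v2 e2 h hle ih =>
    intro lv hlv
    rcases List.mem_cons.mp hlv with rfl | hlv
    · exact le_refl _
    · have := ih lv hlv; omega
  | case2 => simp

theorem levelsL_pairwise (limit v2 e2 : Int) (h : 0 < v2) :
    (levelsL limit v2 e2 h).Pairwise (fun lv lw => lv.1 < lw.1) := by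
  fun_induction levelsL limit v2 e2 h with
  | case1 v2 e2 h hle ih =>
    refine List.Pairwise.cons ?_ ih
    intro lw hlw
    have := levelsL_fst limit (v2 * 2) (e2 + 1) (by omega) lw hlw
    omega
  | case2 => simp


-- == characterizing A's Python sort: the sorted term list, level by level, exp3 descending ==
def termTarget (limit : Int) : List (Int × Int × Int) :=
  (levelsL limit 1 0 one_pos).flatMap (fun lv => ((lv.2).map (fun p => (p.2, lv.1, p.1))).reverse)

theorem insertBy_congr {α : Type} (before before' : α → α → Bool) (x : α) (ys : List α)
    (h : ∀ y ∈ ys, before x y = before' x y) :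
    PySem.List.insertBy before x ys = PySem.List.insertBy before' x ys := by
  induction ys with
  | nil => rfl
  | cons y t ih =>
    simp only [PySem.List.insertBy, h y (by simp)]
    split <;> simp_all [PySem.List.insertBy]

theorem foldl_insertBy_congr {α : Type} (L : List α) (before before' : α → α → Bool)
    (h : ∀ a ∈ L, ∀ b ∈ L, before a b = before' a b) :
    ∀ (xs acc : List α), (∀ x ∈ xs, x ∈ L) → (∀ x ∈ acc, x ∈ L) →
    xs.foldl (fun acc x => PySem.List.insertBy before x acc) acc
      = xs.foldl (fun acc x => PySem.List.insertBy before' x acc) acc := by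
  intro xs
  induction xs with
  | nil => intro acc _ _; rfl
  | cons x xs ih =>
    intro acc hxs hacc
    simp only [List.foldl_cons]
    rw [insertBy_congr before before' x acc (fun y hy => h x (hxs x (by simp)) y (hacc y hy))]
    exact ih _ (fun z hz => hxs z (by simp [hz]))
      (fun z hz => by
        rcases (PySem.List.mem_insertBy _ _ _ _).mp hz with rfl | hz
        · exact hxs z (by simp)
        · exact hacc z hz)

theorem flatMap_perm_congr {α β : Type} (L : List α) (f g : α → List β)
    (h : ∀ x ∈ L, (f x).Perm (g x)) : (L.flatMap f).Perm (L.flatMap g) := by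
  induction L with
  | nil => simp
  | cons x L ih =>
    simp only [List.flatMap_cons]
    exact (h x (by simp)).append (ih (fun y hy => h y (by simp [hy])))

theorem levelsL_mem_bound (limit v2 e2 : Int) (h : 0 < v2) (hv2 : 1 ≤ v2) :
    ∀ lv ∈ levelsL limit v2 e2 h, ∀ p ∈ lv.2, 0 ≤ p.1 ∧ p.1 ≤ limit - 1 := by
  fun_induction levelsL limit v2 e2 h with
  | case1 v2 e2 h hle ih =>
    intro lv hlv
    rcases List.mem_cons.mp hlv with rfl | hlv
    · intro p hp
      have := blocksL_bounds limit v2 0 h p hp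
      omega
    · exact ih (by omega) lv hlv
  | case2 => simp

theorem levelsL_blocks_pairwise (limit v2 e2 : Int) (h : 0 < v2) :
    ∀ lv ∈ levelsL limit v2 e2 h, (lv.2).Pairwise (fun p q => p.1 < q.1) := by
  fun_induction levelsL limit v2 e2 h with
  | case1 v2 e2 h hle ih =>
    intro lv hlv
    rcases List.mem_cons.mp hlv with rfl | hlv
    · exact blocksL_pairwise limit v2 0 h
    · exact ih lv hlv
  | case2 => simp

theorem generate_terms_eq (limit : Int) (hdom : limit ≤ 2147483648) :
    generate_terms limit = termTarget limit := by
  have hxs : genTermsOuter limit 1 0 [] one_pos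
      = (levelsL limit 1 0 one_pos).flatMap (fun lv => (lv.2).map (fun p => (p.2, lv.1, p.1))) := by
    rw [genTermsOuter_eq]; simp
  set M : Int := 2147483650 with hM
  set enc : Int × Int × Int → Int := fun t => t.2.1 * M - t.2.2 with henc
  -- every term in the unsorted list has 0 ≤ exp3 ≤ limit - 1
  have hbound : ∀ t ∈ genTermsOuter limit 1 0 [] one_pos, 0 ≤ t.2.2 ∧ t.2.2 ≤ limit - 1 := by
    rw [hxs]
    intro t ht
    rcases List.mem_flatMap.mp ht with ⟨lv, hlv, ht⟩
    rcases List.mem_map.mp ht with ⟨p, hp, rfl⟩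
    exact levelsL_mem_bound limit 1 0 one_pos le_rfl lv hlv p hp
  -- Python's tuple key (exp2, -exp3) agrees with the single integer key enc on these terms
  have hbefore : ∀ a ∈ genTermsOuter limit 1 0 [] one_pos,
      ∀ b ∈ genTermsOuter limit 1 0 [] one_pos,
      (decide (a.2.1 < b.2.1) || (!decide (b.2.1 < a.2.1) && decide (-a.2.2 < -b.2.2)))
        = decide (enc a < enc b) := by
    intro a ha b hb
    have h1 := hbound a ha
    have h2 := hbound b hb
    rw [Bool.eq_iff_iff]
    simp only [Bool.or_eq_true, Bool.and_eq_true, Bool.not_eq_eq_eq_not, Bool.not_true,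
      decide_eq_true_eq, decide_eq_false_iff_not, henc]
    constructor
    · rintro (hlt | ⟨hnlt, h3⟩)
      · have hle : a.2.1 ≤ b.2.1 - 1 := by omega
        have := mul_le_mul_of_nonneg_right hle (show (0:Int) ≤ M by norm_num)
        have hr : (b.2.1 - 1) * M = b.2.1 * M - M := by ring
        rw [hr] at this
        omega
      · have : a.2.1 = b.2.1 ∨ a.2.1 < b.2.1 := by omega
        rcases this with heq | hlt
        · rw [heq]; omega
        · have hle : a.2.1 ≤ b.2.1 - 1 := by omega
          have := mul_le_mul_of_nonneg_right hle (show (0:Int) ≤ M by norm_num)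
          have hr : (b.2.1 - 1) * M = b.2.1 * M - M := by ring
          rw [hr] at this
          omega
    · intro hlt
      by_cases hab : a.2.1 < b.2.1
      · exact Or.inl hab
      · refine Or.inr ⟨?_, ?_⟩
        · intro hba
          have hle : b.2.1 ≤ a.2.1 - 1 := by omega
          have := mul_le_mul_of_nonneg_right hle (show (0:Int) ≤ M by norm_num)
          have hr : (a.2.1 - 1) * M = a.2.1 * M - M := by ring
          rw [hr] at this
          omega
        · have heq : a.2.1 = b.2.1 := by omega
          rw [heq] at hlt
          omega
  -- sorted2 with the tuple key equals sorted with key enc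
  have hs2 : generate_terms limit
      = PySem.List.sorted (genTermsOuter limit 1 0 [] one_pos) enc := by
    show (genTermsOuter limit 1 0 [] one_pos).foldl
        (fun acc x => PySem.List.insertBy (fun a b =>
          decide (a.2.1 < b.2.1) || (!decide (b.2.1 < a.2.1) && decide (-a.2.2 < -b.2.2))) x acc) []
      = _
    rw [PySem.List.sorted_eq_foldl_insertBy]
    exact foldl_insertBy_congr _ _ _ hbefore _ [] (fun x hx => hx) (by simp)
  rw [hs2]
  apply PySem.List.sorted_eq_of_perm_of_pairwise_lt
  · -- permutation: the target reverses each level block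
    rw [hxs]
    exact flatMap_perm_congr _ _ _ (fun lv _ => (List.reverse_perm _))
  · -- strictly increasing under enc
    rw [termTarget]
    rw [List.pairwise_flatMap]
    constructor
    · intro lv hlv
      rw [List.pairwise_reverse, List.pairwise_map]
      refine List.Pairwise.imp ?_ (levelsL_blocks_pairwise limit 1 0 one_pos lv hlv)
      intro p q hpq
      simp only [henc]
      omega
    · refine List.Pairwise.imp_of_mem ?_ (levelsL_pairwise limit 1 0 one_pos)
      intro lv lw hlv hlw hrel x hx y hy
      rw [List.mem_reverse] at hx hy
      rcases List.mem_map.mp hx with ⟨p, hp, rfl⟩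
      rcases List.mem_map.mp hy with ⟨q, hq, rfl⟩
      have hbp := levelsL_mem_bound limit 1 0 one_pos le_rfl lv hlv p hp
      have hbq := levelsL_mem_bound limit 1 0 one_pos le_rfl lw hlw q hq
      simp only [henc]
      have hle2 : lv.1 ≤ lw.1 - 1 := by omega
      have hmul := mul_le_mul_of_nonneg_right hle2 (show (0:Int) ≤ M by norm_num)
      have hr : (lw.1 - 1) * M = lw.1 * M - M := by ring
      rw [hr] at hmul
      omega


-- == named pieces of A's main loop (definitionally equal to the port's lambdas) ==
def predsOfA (limit : Int) (terms : List (Int × Int × Int)) : List (List Int) :=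
  (PySem.List.pyRange 0 (PySem.List.len terms) 1).map (fun j =>
    (PySem.List.pyRange 0 j 1).foldl (fun acc i =>
      if PySem.List.pyGetD (terms.map (fun t => t.2.1)) i 0
           < PySem.List.pyGetD (terms.map (fun t => t.2.1)) j 0 ∧
         PySem.List.pyGetD (terms.map (fun t => t.2.2)) i 0
           > PySem.List.pyGetD (terms.map (fun t => t.2.2)) j 0
      then acc ++ [i] else acc) [])

def currentA (limit : Int) (terms : List (Int × Int × Int)) (dp : List (PySem.Dict Int Int))
    (idx : Int) : PySem.Dict Int Int :=
  (PySem.List.pyGetD (predsOfA limit terms) idx []).foldl (fun cur pred =>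
    (PySem.List.pyGetD dp pred PySem.Dict.empty).items.foldl (fun cur sw =>
      if sw.1 + PySem.List.pyGetD (terms.map (fun t => t.1)) idx 0 > limit then cur
      else cur.insert (sw.1 + PySem.List.pyGetD (terms.map (fun t => t.1)) idx 0)
        (cur.getD (sw.1 + PySem.List.pyGetD (terms.map (fun t => t.1)) idx 0) 0 + sw.2)) cur)
    (if PySem.List.pyGetD (terms.map (fun t => t.1)) idx 0 ≤ limit then
        (PySem.Dict.empty : PySem.Dict Int Int).insert (PySem.List.pyGetD (terms.map (fun t => t.1)) idx 0) 1
      else PySem.Dict.empty)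

def stepAFun (limit : Int) (terms : List (Int × Int × Int))
    (st : List Int × List (PySem.Dict Int Int)) (idx : Int) :
    List Int × List (PySem.Dict Int Int) :=
  ((currentA limit terms st.2 idx).items.foldl (fun c sw =>
      PySem.List.pySetD c sw.1 (PySem.List.pyGetD c sw.1 0 + sw.2)) st.1,
   st.2 ++ [currentA limit terms st.2 idx])

theorem enum_A_eq (limit : Int) :
    enumerate_special_sums limit
      = (if generate_terms limit = [] then List.replicate (limit + 1).toNat 0
         else ((PySem.List.pyRange 0 (PySem.List.len (generate_terms limit)) 1).foldl
           (stepAFun limit (generate_terms limit))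
           (List.replicate (limit + 1).toNat 0, ([] : List (PySem.Dict Int Int)))).1) := by
  rfl


-- mass of chains ending at a node with value v, exp3 b, as B's states describe them
def nodeMass (limit : Int) (states : PySem.Dict Int (PySem.Dict Int Int)) (v b u : Int) : Int :=
  (if u = v then 1 else 0) +
  (if u ≤ limit then
    ((states.keys).map (fun bp =>
      if bp > b then (states.getD bp PySem.Dict.empty).getD (u - v) 0 else 0)).sum
   else 0)

theorem pyGetD_map_term (T : List (Int × Int × Int)) (f : (Int × Int × Int) → Int) (j : Nat)
    (hj : j < T.length) :
    PySem.List.pyGetD (T.map f) (j : Int) 0 = f (T.getD j (0, 0, 0)) := by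
  rw [PySem.List.pyGetD_natCast, List.getD_eq_getElem _ _ (by simpa using hj),
    List.getElem_map, List.getD_eq_getElem _ _ hj]

theorem pyGetD_dp (dp : List (PySem.Dict Int Int)) (i : Int) (h0 : 0 ≤ i)
    (h1 : i.toNat < dp.length) :
    PySem.List.pyGetD dp i PySem.Dict.empty = dp.getD i.toNat PySem.Dict.empty := by
  rw [PySem.List.pyGetD_eq_getElem dp _ h0 (by omega), List.getD_eq_getElem _ _ h1]

theorem predsOfA_at (limit : Int) (T : List (Int × Int × Int)) (j : Nat) (hj : j < T.length) :
    PySem.List.pyGetD (predsOfA limit T) (j : Int) []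
      = (PySem.List.pyRange 0 (j : Int) 1).filter (fun i => decide
          (PySem.List.pyGetD (T.map (fun t => t.2.1)) i 0
             < PySem.List.pyGetD (T.map (fun t => t.2.1)) (j : Int) 0 ∧
           PySem.List.pyGetD (T.map (fun t => t.2.2)) i 0
             > PySem.List.pyGetD (T.map (fun t => t.2.2)) (j : Int) 0)) := by
  unfold predsOfA
  rw [PySem.List.len_eq]
  rw [PySem.List.pyGetD_map_pyRange _ T.length j _ hj]
  rw [PySem.List.foldl_append_ite_eq_filter (fun i =>
    PySem.List.pyGetD (T.map (fun t => t.2.1)) i 0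
      < PySem.List.pyGetD (T.map (fun t => t.2.1)) (j : Int) 0 ∧
    PySem.List.pyGetD (T.map (fun t => t.2.2)) i 0
      > PySem.List.pyGetD (T.map (fun t => t.2.2)) (j : Int) 0)]
  simp

theorem predLoop (limit v : Int) (dp : List (PySem.Dict Int Int)) (F : List Int)
    (hF : ∀ i ∈ F, 0 ≤ i ∧ i.toNat < dp.length)
    (hnd : ∀ i ∈ F, ((dp.getD i.toNat PySem.Dict.empty).keys).Nodup) :
    ∀ (cur0 : PySem.Dict Int Int), cur0.keys.Nodup →
    ((F.foldl (fun cur i =>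
        (PySem.List.pyGetD dp i PySem.Dict.empty).items.foldl (fun cur (sw : Int × Int) =>
          if sw.1 + v > limit then cur
          else cur.insert (sw.1 + v) (cur.getD (sw.1 + v) 0 + sw.2)) cur) cur0).keys.Nodup
    ∧ (∀ k ∈ (F.foldl (fun cur i =>
        (PySem.List.pyGetD dp i PySem.Dict.empty).items.foldl (fun cur (sw : Int × Int) =>
          if sw.1 + v > limit then cur
          else cur.insert (sw.1 + v) (cur.getD (sw.1 + v) 0 + sw.2)) cur) cur0).keys,
        k ∈ cur0.keys ∨ ((∃ i ∈ F, ∃ s ∈ (dp.getD i.toNat PySem.Dict.empty).keys, k = s + v) ∧ k ≤ limit))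
    ∧ ∀ u, ((F.foldl (fun cur i =>
        (PySem.List.pyGetD dp i PySem.Dict.empty).items.foldl (fun cur (sw : Int × Int) =>
          if sw.1 + v > limit then cur
          else cur.insert (sw.1 + v) (cur.getD (sw.1 + v) 0 + sw.2)) cur) cur0).getD u 0)
        = cur0.getD u 0
          + (F.map (fun i => if u ≤ limit then
              (dp.getD i.toNat PySem.Dict.empty).getD (u - v) 0 else 0)).sum) := by
  induction F with
  | nil => intro cur0 h0; exact ⟨h0, fun k hk => Or.inl hk, by simp⟩
  | cons i F ih =>
    intro cur0 h0
    have hi := hF i (by simp)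
    have hdpi : PySem.List.pyGetD dp i PySem.Dict.empty = dp.getD i.toNat PySem.Dict.empty :=
      pyGetD_dp dp i hi.1 hi.2
    have hndi : ((dp.getD i.toNat PySem.Dict.empty).keys).Nodup := hnd i (by simp)
    simp only [List.foldl_cons]
    set cur1 := (PySem.List.pyGetD dp i PySem.Dict.empty).items.foldl (fun cur (sw : Int × Int) =>
      if sw.1 + v > limit then cur
      else cur.insert (sw.1 + v) (cur.getD (sw.1 + v) 0 + sw.2)) cur0 with hcur1
    have h1nd : cur1.keys.Nodup := predStep_nodup _ v limit cur0 h0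
    obtain ⟨hrnd, hrkeys, hrget⟩ := ih (fun i' hi' => hF i' (by simp [hi']))
      (fun i' hi' => hnd i' (by simp [hi'])) cur1 h1nd
    refine ⟨hrnd, ?_, ?_⟩
    · intro k hk
      rcases hrkeys k hk with hk1 | ⟨⟨i', hi', hs⟩, hlim⟩
      · rcases predStep_keys _ v limit cur0 k hk1 with hk0 | ⟨sw, hsw, hkeq, hklim⟩
        · exact Or.inl hk0
        · refine Or.inr ⟨⟨i, by simp, sw.1, ?_, hkeq⟩, hklim⟩
          rw [hdpi] at hsw
          exact PySem.Dict.mem_keys_of_mem_items _ hsw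
      · exact Or.inr ⟨⟨i', by simp [hi'], hs⟩, hlim⟩
    · intro u
      rw [hrget u, hcur1, predStep_getD, hdpi,
        shifted_mass (dp.getD i.toNat PySem.Dict.empty) hndi v u limit]
      simp only [List.map_cons, List.sum_cons]
      ring


theorem sum_filter_ite {α : Type} (l : List α) (p : α → Bool) (g : α → Int) :
    (((l.filter p).map g)).sum = (l.map (fun x => if p x then g x else 0)).sum := by
  induction l with
  | nil => simp
  | cons x l ih =>
    by_cases hx : p x <;> simp [hx, ih]

theorem currentA_spec (limit : Int) (T : List (Int × Int × Int)) (e2 : Int) (pLen : Nat)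
    (states : PySem.Dict Int (PySem.Dict Int Int)) (dp : List (PySem.Dict Int Int))
    (j : Nat) (hjT : j < T.length) (hjp : pLen ≤ j)
    (hdpge : pLen ≤ dp.length)
    (hprior : ∀ k, k < pLen → (T.getD k (0, 0, 0)).2.1 < e2)
    (hlevel : ∀ k, pLen ≤ k → k ≤ j → (T.getD k (0, 0, 0)).2.1 = e2)
    (hval : 1 < (T.getD j (0, 0, 0)).1 ∧ (T.getD j (0, 0, 0)).1 ≤ limit)
    (hndstates : states.keys.Nodup)
    (hnddp : ∀ k, k < pLen → ((dp.getD k PySem.Dict.empty).keys).Nodup)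
    (hdpbound : ∀ k, k < pLen → ∀ s ∈ (dp.getD k PySem.Dict.empty).keys, 2 ≤ s ∧ s ≤ limit)
    (hmem : ∀ k, k < pLen → (T.getD k (0, 0, 0)).2.2 ∈ states.keys)
    (hinv : ∀ bp u : Int, (states.getD bp PySem.Dict.empty).getD u 0
      = ((PySem.List.pyRange 0 (pLen : Int) 1).map (fun i =>
          if (T.getD i.toNat (0, 0, 0)).2.2 = bp
          then (dp.getD i.toNat PySem.Dict.empty).getD u 0 else 0)).sum) :
    ((currentA limit T dp (j : Int)).keys.Nodup)
    ∧ (∀ k ∈ (currentA limit T dp (j : Int)).keys, 2 ≤ k ∧ k ≤ limit)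
    ∧ ∀ u, (currentA limit T dp (j : Int)).getD u 0
        = nodeMass limit states (T.getD j (0, 0, 0)).1 (T.getD j (0, 0, 0)).2.2 u := by
  unfold currentA
  simp only [pyGetD_map_term T (fun t => t.1) j hjT]
  rw [if_pos hval.2]
  rw [predsOfA_at limit T j hjT]
  -- reduce the predecessor index list to prior positions with larger exp3
  have hfilter : (PySem.List.pyRange 0 (j : Int) 1).filter (fun i => decide
        (PySem.List.pyGetD (T.map (fun t => t.2.1)) i 0
           < PySem.List.pyGetD (T.map (fun t => t.2.1)) (j : Int) 0 ∧
         PySem.List.pyGetD (T.map (fun t => t.2.2)) i 0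
           > PySem.List.pyGetD (T.map (fun t => t.2.2)) (j : Int) 0))
      = (PySem.List.pyRange 0 (pLen : Int) 1).filter (fun i => decide
          ((T.getD i.toNat (0, 0, 0)).2.2 > (T.getD j (0, 0, 0)).2.2)) := by
    rw [PySem.List.pyRange_one_append 0 (pLen : Int) (j : Int) (by positivity)
      (by exact_mod_cast hjp)]
    rw [List.filter_append]
    have h2 : (PySem.List.pyRange (pLen : Int) (j : Int) 1).filter (fun i => decide
        (PySem.List.pyGetD (T.map (fun t => t.2.1)) i 0
           < PySem.List.pyGetD (T.map (fun t => t.2.1)) (j : Int) 0 ∧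
         PySem.List.pyGetD (T.map (fun t => t.2.2)) i 0
           > PySem.List.pyGetD (T.map (fun t => t.2.2)) (j : Int) 0)) = [] := by
      rw [List.filter_eq_nil_iff]
      intro i hi
      rw [PySem.List.mem_pyRange_one] at hi
      have hit : i = (i.toNat : Int) := by omega
      have hitT : i.toNat < T.length := by omega
      rw [hit, pyGetD_map_term T (fun t => t.2.1) i.toNat hitT,
        pyGetD_map_term T (fun t => t.2.1) j hjT]
      have hieq : (T.getD i.toNat (0, 0, 0)).2.1 = e2 := hlevel i.toNat (by omega) (by omega)
      have hjeq : (T.getD j (0, 0, 0)).2.1 = e2 := hlevel j hjp le_rfl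
      intro hcontra
      simp only [decide_eq_true_eq] at hcontra
      rcases hcontra with ⟨h1, -⟩
      rw [hieq, hjeq] at h1
      exact lt_irrefl _ h1
    rw [h2, List.append_nil]
    refine List.filter_congr ?_
    intro i hi
    rw [PySem.List.mem_pyRange_one] at hi
    have hit : i = (i.toNat : Int) := by omega
    have hitT : i.toNat < T.length := by omega
    rw [hit, pyGetD_map_term T (fun t => t.2.1) i.toNat hitT,
      pyGetD_map_term T (fun t => t.2.1) j hjT,
      pyGetD_map_term T (fun t => t.2.2) i.toNat hitT,
      pyGetD_map_term T (fun t => t.2.2) j hjT]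
    have hieq : (T.getD i.toNat (0, 0, 0)).2.1 < e2 := hprior i.toNat (by omega)
    have hjeq : (T.getD j (0, 0, 0)).2.1 = e2 := hlevel j hjp le_rfl
    simp only [decide_eq_decide]
    rw [hjeq]
    constructor
    · rintro ⟨_, h⟩; exact h
    · intro h; exact ⟨hieq, h⟩
  rw [hfilter]
  -- apply the predecessor-loop characterization
  set F := (PySem.List.pyRange 0 (pLen : Int) 1).filter (fun i => decide
      ((T.getD i.toNat (0, 0, 0)).2.2 > (T.getD j (0, 0, 0)).2.2)) with hF
  have hFmem : ∀ i ∈ F, 0 ≤ i ∧ i.toNat < pLen := by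
    intro i hi
    rw [hF, List.mem_filter, PySem.List.mem_pyRange_one] at hi
    omega
  have hcur0nd : ((PySem.Dict.empty : PySem.Dict Int Int).insert (T.getD j (0, 0, 0)).1 1).keys.Nodup :=
    PySem.Dict.nodup_keys_insert _ _ _ (by simp [PySem.Dict.keys_empty])
  obtain ⟨hnd1, hkeys1, hget1⟩ := predLoop limit (T.getD j (0, 0, 0)).1 dp F
    (fun i hi => ⟨(hFmem i hi).1, by have := (hFmem i hi).2; omega⟩)
    (fun i hi => hnddp i.toNat (hFmem i hi).2)
    ((PySem.Dict.empty : PySem.Dict Int Int).insert (T.getD j (0, 0, 0)).1 1) hcur0nd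
  refine ⟨hnd1, ?_, ?_⟩
  · intro k hk
    rcases hkeys1 k hk with hk0 | ⟨⟨i, hiF, s, hs, rfl⟩, hlim⟩
    · rw [PySem.Dict.mem_keys_insert] at hk0
      rcases hk0 with rfl | hk0
      · exact ⟨by omega, hval.2⟩
      · simp [PySem.Dict.keys_empty] at hk0
    · have := hdpbound i.toNat (hFmem i hiF).2 s hs
      constructor
      · omega
      · exact hlim
  · intro u
    rw [hget1 u]
    have hcur0get : ((PySem.Dict.empty : PySem.Dict Int Int).insert (T.getD j (0, 0, 0)).1 1).getD u 0
        = if u = (T.getD j (0, 0, 0)).1 then 1 else 0 := by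
      rw [PySem.Dict.getD_insert]
      by_cases hu : u = (T.getD j (0, 0, 0)).1 <;> simp [hu, PySem.Dict.getD_empty]
    rw [hcur0get]
    unfold nodeMass
    congr 1
    by_cases hu : u ≤ limit
    · simp only [if_pos hu]
      rw [hF, sum_filter_ite]
      simp only [decide_eq_true_eq]
      rw [sum_partition (PySem.List.pyRange 0 (pLen : Int) 1) states.keys hndstates
        (fun i => (T.getD i.toNat (0, 0, 0)).2.2)
        (fun i hi => by rw [PySem.List.mem_pyRange_one] at hi; exact hmem i.toNat (by omega))
        (fun k => k > (T.getD j (0, 0, 0)).2.2)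
        (fun i => (dp.getD i.toNat PySem.Dict.empty).getD (u - (T.getD j (0, 0, 0)).1) 0)]
      congr 1
      refine List.map_congr_left (fun k hk => ?_)
      by_cases hkb : k > (T.getD j (0, 0, 0)).2.2
      · rw [if_pos hkb, if_pos hkb, hinv k (u - (T.getD j (0, 0, 0)).1)]
      · rw [if_neg hkb, if_neg hkb]
    · simp [hu]


theorem levelStep (limit : Int) (T : List (Int × Int × Int)) (e2 : Int) (pLen : Nat)
    (states : PySem.Dict Int (PySem.Dict Int Int)) (dp0 : List (PySem.Dict Int Int))
    (hdp0 : dp0.length = pLen)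
    (hprior : ∀ k, k < pLen → (T.getD k (0, 0, 0)).2.1 < e2)
    (hndstates : states.keys.Nodup)
    (hnddp0 : ∀ k, k < pLen → ((dp0.getD k PySem.Dict.empty).keys).Nodup)
    (hdpbound0 : ∀ k, k < pLen → ∀ s ∈ (dp0.getD k PySem.Dict.empty).keys, 2 ≤ s ∧ s ≤ limit)
    (hmem : ∀ k, k < pLen → (T.getD k (0, 0, 0)).2.2 ∈ states.keys)
    (hinv : ∀ bp u : Int, (states.getD bp PySem.Dict.empty).getD u 0
      = ((PySem.List.pyRange 0 (pLen : Int) 1).map (fun i =>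
          if (T.getD i.toNat (0, 0, 0)).2.2 = bp
          then (dp0.getD i.toNat PySem.Dict.empty).getD u 0 else 0)).sum)
    (mLen : Nat) (hTm : pLen + mLen ≤ T.length) (hlim : 0 ≤ limit)
    (hlev : ∀ k, pLen ≤ k → k < pLen + mLen → (T.getD k (0, 0, 0)).2.1 = e2
      ∧ 1 < (T.getD k (0, 0, 0)).1 ∧ (T.getD k (0, 0, 0)).1 ≤ limit) :
    ∀ (m d : Nat), d + m = mLen → ∀ (c : List Int) (dpE : List (PySem.Dict Int Int)),
      dpE.length = d → c.length = (limit + 1).toNat →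
    ∃ (c' : List Int) (dpE' : List (PySem.Dict Int Int)),
    ((PySem.List.pyRange ((pLen + d : Nat) : Int) ((pLen + mLen : Nat) : Int) 1).foldl
       (stepAFun limit T) (c, dp0 ++ dpE)) = (c', dp0 ++ dpE ++ dpE')
    ∧ dpE'.length = m
    ∧ (∀ r, r < m → ((dpE'.getD r PySem.Dict.empty).keys.Nodup
        ∧ (∀ k ∈ (dpE'.getD r PySem.Dict.empty).keys, 2 ≤ k ∧ k ≤ limit)
        ∧ ∀ u, (dpE'.getD r PySem.Dict.empty).getD u 0
            = nodeMass limit states (T.getD (pLen + d + r) (0, 0, 0)).1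
                (T.getD (pLen + d + r) (0, 0, 0)).2.2 u))
    ∧ c'.length = c.length
    ∧ (∀ t : Nat, t < c.length → c'.getD t 0
        = c.getD t 0 + ((List.range m).map (fun r =>
            (dpE'.getD r PySem.Dict.empty).getD ((t : Int)) 0)).sum) := by
  intro m
  induction m with
  | zero =>
    intro d hd c dpE hdpE hc
    refine ⟨c, [], ?_, rfl, by omega, rfl, by simp⟩
    rw [PySem.List.pyRange_one_eq_nil (by omega : ((pLen + mLen : Nat) : Int) ≤ ((pLen + d : Nat) : Int))]
    simp
  | succ m ihm =>
    intro d hd c dpE hdpE hc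
    have hdlt : ((pLen + d : Nat) : Int) < ((pLen + mLen : Nat) : Int) := by
      push_cast; omega
    rw [PySem.List.pyRange_one_cons hdlt, List.foldl_cons]
    have hstep : stepAFun limit T (c, dp0 ++ dpE) ((pLen + d : Nat) : Int)
        = ((currentA limit T (dp0 ++ dpE) ((pLen + d : Nat) : Int)).items.foldl (fun c sw =>
            PySem.List.pySetD c sw.1 (PySem.List.pyGetD c sw.1 0 + sw.2)) c,
           (dp0 ++ dpE) ++ [currentA limit T (dp0 ++ dpE) ((pLen + d : Nat) : Int)]) := rfl
    set j : Nat := pLen + d with hjdef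
    -- facts transported through the append dp0 ++ dpE
    have hgetapp : ∀ k : Nat, k < pLen →
        (dp0 ++ dpE).getD k PySem.Dict.empty = dp0.getD k PySem.Dict.empty := by
      intro k hk
      rw [List.getD_append _ _ _ _ (by omega)]
    obtain ⟨cnd, ckeys, cget⟩ := currentA_spec limit T e2 pLen states (dp0 ++ dpE) j
      (by omega) (by omega) (by simp [hdp0])
      hprior
      (fun k hk1 hk2 => (hlev k hk1 (by omega)).1)
      ⟨(hlev j (by omega) (by omega)).2.1, (hlev j (by omega) (by omega)).2.2⟩
      hndstates
      (fun k hk => by rw [hgetapp k hk]; exact hnddp0 k hk)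
      (fun k hk => by rw [hgetapp k hk]; exact hdpbound0 k hk)
      hmem
      (fun bp u => by
        rw [hinv bp u]
        congr 1
        refine List.map_congr_left (fun i hi => ?_)
        rw [PySem.List.mem_pyRange_one] at hi
        rw [hgetapp i.toNat (by omega)])
    set cur := currentA limit T (dp0 ++ dpE) ((j : Nat) : Int) with hcurdef
    -- the counts update for this node
    have hbounds : ∀ p ∈ cur.items, 0 ≤ p.1 ∧ p.1 < (c.length : Int) := by
      intro p hp
      have := ckeys p.1 (PySem.Dict.mem_keys_of_mem_items _ hp)
      have hcl : (c.length : Int) = limit + 1 := by rw [hc]; omega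
      omega
    have hc1len := counts_fold_length cur.items c
    have hc1get := fun (t : Nat) (ht : t < c.length) => counts_fold_getD cur.items c hbounds t ht
    -- recurse on the rest of the level
    obtain ⟨c', dpE', heq, hlen', hprops', hclen', hcget'⟩ :=
      ihm (d + 1) (by omega)
        (cur.items.foldl (fun c sw =>
          PySem.List.pySetD c sw.1 (PySem.List.pyGetD c sw.1 0 + sw.2)) c)
        (dpE ++ [cur]) (by simp [hdpE]) (by rw [hc1len, hc])
    refine ⟨c', cur :: dpE', ?_, by simp [hlen'], ?_, ?_, ?_⟩
    · rw [hstep]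
      have hcast : ((pLen + d : Nat) : Int) + 1 = ((pLen + (d + 1) : Nat) : Int) := by push_cast; ring
      rw [hcast]
      rw [← List.append_assoc] at heq
      rw [heq]
      simp
    · intro r hr
      rcases Nat.eq_zero_or_pos r with rfl | hrpos
      · simpa using ⟨cnd, ckeys, fun u => by simpa using cget u⟩
      · have := hprops' (r - 1) (by omega)
        have hgetr : (cur :: dpE').getD r PySem.Dict.empty = dpE'.getD (r - 1) PySem.Dict.empty := by
          rcases Nat.exists_eq_succ_of_ne_zero (by omega : r ≠ 0) with ⟨r', rfl⟩
          simp
        rw [hgetr]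
        have hpos : pLen + (d + 1) + (r - 1) = pLen + d + r := by omega
        rw [hpos] at this
        exact this
    · rw [hclen', hc1len]
    · intro t ht
      rw [hcget' t (by rw [hc1len]; exact ht), hc1get t ht,
        massD_items cur cnd ((t : Nat) : Int)]
      have hr : (List.range (m + 1)).map (fun r => ((cur :: dpE').getD r PySem.Dict.empty).getD ((t : Nat) : Int) 0)
          = (cur.getD ((t : Nat) : Int) 0) :: ((List.range m).map (fun r => (dpE'.getD r PySem.Dict.empty).getD ((t : Nat) : Int) 0)) := by
        rw [List.range_succ_eq_map, List.map_cons, List.map_map]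
        simp
      rw [hr]
      simp only [List.sum_cons]
      ring


def massS (l : List (Int × Int × Int)) (t : Int) : Int :=
  (l.map (fun e => if e.2.1 = t then e.2.2 else 0)).sum

theorem massS_map_snd (l : List (Int × Int × Int)) (t : Int) :
    massD (l.map (fun e => e.2)) t = massS l t := by
  simp [massD, massS, List.map_map, Function.comp_def]

theorem sum_flatMap_int {α : Type} (l : List α) (f : α → List Int) :
    (l.flatMap f).sum = (l.map (fun a => (f a).sum)).sum := by
  induction l with
  | nil => rfl
  | cons x l ih => simp [ih]

theorem massE_const_fst (l : List (Int × Int × Int)) (b0 : Int)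
    (h : ∀ e ∈ l, e.1 = b0) (b u : Int) :
    massE l b u = if b0 = b then massS l u else 0 := by
  induction l with
  | nil => simp [massE, massS]
  | cons e l ih =>
    have he := h e (by simp)
    have ihl := ih (fun e' he' => h e' (by simp [he']))
    subst he
    simp only [massE, massS, List.map_cons, List.sum_cons] at ihl ⊢
    rw [ihl]
    by_cases hb : e.1 = b
    · by_cases hu : e.2.1 = u <;> simp [hb, hu] <;> ring
    · have : ¬ (e.1 = b ∧ e.2.1 = u) := fun hc => hb hc.1
      simp [hb, this]

theorem sum_over_keys (states : PySem.Dict Int (PySem.Dict Int Int))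
    (hnds : states.keys.Nodup) (f : Int → PySem.Dict Int Int → Int) :
    (states.items.map (fun pd => f pd.1 pd.2)).sum
      = (states.keys.map (fun k => f k (states.getD k PySem.Dict.empty))).sum := by
  rw [PySem.Dict.items_eq_map_keys states hnds PySem.Dict.empty, List.map_map]
  rfl

theorem extEntries_mass (limit : Int) (states : PySem.Dict Int (PySem.Dict Int Int)) (b v t : Int)
    (hnds : states.keys.Nodup)
    (hndinner : ∀ bp : Int, ((states.getD bp PySem.Dict.empty).keys).Nodup) :
    massS (extEntries limit states b v) t
      = if t ≤ limit then
          ((states.keys).map (fun bp =>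
            if bp > b then (states.getD bp PySem.Dict.empty).getD (t - v) 0 else 0)).sum
        else 0 := by
  unfold massS extEntries
  rw [List.map_flatMap, sum_flatMap_int]
  rw [sum_over_keys states hnds (fun k d =>
    (List.map (fun e : Int × Int × Int => if e.2.1 = t then e.2.2 else 0)
      (if k > b then
        (d.items.filter (fun sw => decide (sw.1 + v ≤ limit))).map (fun sw => (b, sw.1 + v, sw.2))
      else [])).sum)]
  have h2 : ∀ bp ∈ states.keys,
      (List.map (fun e : Int × Int × Int => if e.2.1 = t then e.2.2 else 0)
        (if bp > b then
          ((states.getD bp PySem.Dict.empty).items.filter (fun sw => decide (sw.1 + v ≤ limit))).map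
            (fun sw => (b, sw.1 + v, sw.2))
        else [])).sum
      = if bp > b then (if t ≤ limit then (states.getD bp PySem.Dict.empty).getD (t - v) 0 else 0)
        else 0 := by
    intro bp _
    by_cases hbp : bp > b
    · rw [if_pos hbp, if_pos hbp, List.map_map]
      have hmm : (List.map ((fun e : Int × Int × Int => if e.2.1 = t then e.2.2 else 0) ∘ fun sw : Int × Int => (b, sw.1 + v, sw.2))
            ((states.getD bp PySem.Dict.empty).items.filter (fun sw => decide (sw.1 + v ≤ limit)))).sum
          = (((states.getD bp PySem.Dict.empty).items.filter (fun sw => decide (sw.1 + v ≤ limit))).map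
              (fun sw : Int × Int => if sw.1 + v = t then sw.2 else 0)).sum := rfl
      rw [hmm, sum_filter_ite]
      rw [← shifted_mass (states.getD bp PySem.Dict.empty) (hndinner bp) v t limit]
      congr 1
      refine List.map_congr_left (fun sw _ => ?_)
      by_cases h1 : sw.1 + v ≤ limit
      · simp only [h1, decide_true, if_true]
        by_cases h2 : sw.1 + v = t
        · rw [if_pos h2, if_pos ⟨h2, by omega⟩]
        · rw [if_neg h2, if_neg (by rintro ⟨hh, -⟩; exact h2 hh)]
      · simp only [h1, decide_false, Bool.false_eq_true, if_false]
        rw [if_neg (by rintro ⟨hh, hh2⟩; omega)]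
    · rw [if_neg hbp, if_neg hbp]
      simp
  rw [List.map_congr_left h2]
  by_cases ht : t ≤ limit
  · simp only [if_pos ht]
  · simp [ht]


theorem sum_range_getD {α : Type} (l : List α) (d : α) (f : α → Int) :
    ((List.range l.length).map (fun r => f (l.getD r d))).sum = (l.map f).sum := by
  have he : (List.range l.length).map (fun r => f (l.getD r d)) = l.map f := by
    apply List.ext_getElem (by simp)
    intro i h1 h2
    have hi : i < l.length := by simpa using h2
    simp [List.getD, List.getElem?_eq_getElem hi]
  rw [he]

theorem entriesFor_fst (limit : Int) (states : PySem.Dict Int (PySem.Dict Int Int)) (b v : Int) :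
    ∀ e ∈ (b, v, (1 : Int)) :: extEntries limit states b v, e.1 = b := by
  intro e he
  rcases List.mem_cons.mp he with rfl | he
  · rfl
  · unfold extEntries at he
    rcases List.mem_flatMap.mp he with ⟨pd, _, he⟩
    split at he
    · rcases List.mem_map.mp he with ⟨sw, _, rfl⟩; rfl
    · simp at he

theorem entriesFor_mass (limit : Int) (states : PySem.Dict Int (PySem.Dict Int Int)) (b v u : Int)
    (hnds : states.keys.Nodup)
    (hndinner : ∀ bp : Int, ((states.getD bp PySem.Dict.empty).keys).Nodup) :
    massS ((b, v, (1 : Int)) :: extEntries limit states b v) u = nodeMass limit states v b u := by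
  rw [massS]
  simp only [List.map_cons, List.sum_cons]
  rw [← massS, extEntries_mass limit states b v u hnds hndinner, nodeMass]
  congr 1
  by_cases hv : v = u
  · subst hv; simp
  · rw [if_neg hv, if_neg (fun hc => hv hc.symm)]

theorem entries_bounds (limit v2 : Int) (h : 0 < v2) (states : PySem.Dict Int (PySem.Dict Int Int))
    (hnds : states.keys.Nodup)
    (hsbound : ∀ bp : Int, ∀ s ∈ (states.getD bp PySem.Dict.empty).keys, 2 ≤ s ∧ s ≤ limit) :
    ∀ e ∈ (blocksL limit v2 0 h).flatMap
        (fun p => (p.1, p.2, (1 : Int)) :: extEntries limit states p.1 p.2),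
      2 ≤ e.2.1 ∧ e.2.1 ≤ limit := by
  intro e he
  rcases List.mem_flatMap.mp he with ⟨p, hp, he⟩
  have hpb := blocksL_bounds limit v2 0 h p hp
  rcases List.mem_cons.mp he with rfl | he
  · show 2 ≤ p.2 ∧ p.2 ≤ limit
    exact ⟨by omega, hpb.2.1⟩
  · unfold extEntries at he
    rcases List.mem_flatMap.mp he with ⟨pd, hpd, he⟩
    split at he
    · rcases List.mem_map.mp he with ⟨sw, hsw, rfl⟩
      rw [List.mem_filter] at hsw
      have hpdeq : states.getD pd.1 PySem.Dict.empty = pd.2 :=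
        PySem.Dict.getD_of_mem_items states (Prod.mk.eta.symm ▸ hpd) hnds PySem.Dict.empty
      have hswk : sw.1 ∈ (states.getD pd.1 PySem.Dict.empty).keys := by
        rw [hpdeq]
        exact PySem.Dict.mem_keys_of_mem_items _ hsw.1
      have := hsbound pd.1 sw.1 hswk
      show 2 ≤ sw.1 + p.2 ∧ sw.1 + p.2 ≤ limit
      refine ⟨by omega, by simpa using hsw.2⟩
    · simp at he

theorem altOuter_step (limit power2 : Int) (c : List Int)
    (states : PySem.Dict Int (PySem.Dict Int Int)) (h : 0 < power2) (hle : power2 ≤ limit) :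
    altOuter limit power2 c states h
      = altOuter limit (power2 * 2)
          ((altLevelEntries limit power2 0 states [] h).foldl
            (fun (st : List Int × PySem.Dict Int (PySem.Dict Int Int)) e =>
              (PySem.List.pySetD st.1 e.2.1 (PySem.List.pyGetD st.1 e.2.1 0 + e.2.2),
               st.2.modify e.1 PySem.Dict.empty (fun d => d.insert e.2.1 (d.getD e.2.1 0 + e.2.2))))
            (c, states)).1
          ((altLevelEntries limit power2 0 states [] h).foldl
            (fun (st : List Int × PySem.Dict Int (PySem.Dict Int Int)) e =>
              (PySem.List.pySetD st.1 e.2.1 (PySem.List.pyGetD st.1 e.2.1 0 + e.2.2),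
               st.2.modify e.1 PySem.Dict.empty (fun d => d.insert e.2.1 (d.getD e.2.1 0 + e.2.2))))
            (c, states)).2 (by omega) := by
  rw [altOuter, dif_pos hle]

theorem mass_flatMap {α : Type} (blocks : List α) (ef : α → List (Int × Int × Int))
    (h : (Int × Int × Int) → Int) :
    ((blocks.flatMap ef).map h).sum = (blocks.map (fun p => ((ef p).map h).sum)).sum := by
  rw [List.map_flatMap, sum_flatMap_int]

theorem mainAlign (limit : Int) (T : List (Int × Int × Int)) (fuel : Nat) :
    ∀ (v2 e2 : Int) (h : 0 < v2) (pLen : Nat) (c : List Int)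
      (dp0 : List (PySem.Dict Int Int)) (states : PySem.Dict Int (PySem.Dict Int Int)),
    (limit + 1 - v2).toNat ≤ fuel →
    T = T.take pLen ++ (levelsL limit v2 e2 h).flatMap
        (fun lv => ((lv.2).map (fun p => (p.2, lv.1, p.1))).reverse) →
    pLen ≤ T.length →
    dp0.length = pLen →
    c.length = (limit + 1).toNat →
    (∀ k, k < pLen → (T.getD k (0, 0, 0)).2.1 < e2) →
    states.keys.Nodup →
    (∀ b : Int, ((states.getD b PySem.Dict.empty).keys).Nodup) →
    (∀ k, k < pLen → ((dp0.getD k PySem.Dict.empty).keys).Nodup) →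
    (∀ k, k < pLen → ∀ s ∈ (dp0.getD k PySem.Dict.empty).keys, 2 ≤ s ∧ s ≤ limit) →
    (∀ b : Int, ∀ s ∈ (states.getD b PySem.Dict.empty).keys, 2 ≤ s ∧ s ≤ limit) →
    (∀ k, k < pLen → (T.getD k (0, 0, 0)).2.2 ∈ states.keys) →
    (∀ bp u : Int, (states.getD bp PySem.Dict.empty).getD u 0
       = ((PySem.List.pyRange 0 (pLen : Int) 1).map (fun i =>
           if (T.getD i.toNat (0, 0, 0)).2.2 = bp
           then (dp0.getD i.toNat PySem.Dict.empty).getD u 0 else 0)).sum) →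
    ((PySem.List.pyRange (pLen : Int) (T.length : Int) 1).foldl (stepAFun limit T) (c, dp0)).1
       = altOuter limit v2 c states h := by
  induction fuel with
  | zero =>
    intro v2 e2 h pLen c dp0 states hfuel hsuffix hpT hdp0 hc hprior hnds hndi hnddp hdpb hsb hmem hinv
    have hv2 : ¬ v2 ≤ limit := by omega
    rw [levelsL, dif_neg hv2] at hsuffix
    simp only [List.flatMap_nil, List.append_nil] at hsuffix
    have hlen : T.length ≤ pLen := by
      conv_lhs => rw [hsuffix]
      simp
    rw [PySem.List.pyRange_one_eq_nil (by exact_mod_cast hlen), List.foldl_nil,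
      altOuter, dif_neg hv2]
  | succ n ihn =>
    intro v2 e2 h pLen c dp0 states hfuel hsuffix hpT hdp0 hc hprior hnds hndi hnddp hdpb hsb hmem hinv
    by_cases hv2 : v2 ≤ limit
    case neg =>
      rw [levelsL, dif_neg hv2] at hsuffix
      simp only [List.flatMap_nil, List.append_nil] at hsuffix
      have hlen : T.length ≤ pLen := by
        conv_lhs => rw [hsuffix]
        simp
      rw [PySem.List.pyRange_one_eq_nil (by exact_mod_cast hlen), List.foldl_nil,
        altOuter, dif_neg hv2]
    case pos =>
      rw [levelsL, dif_pos hv2] at hsuffix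
      simp only [List.flatMap_cons] at hsuffix
      set blocks := blocksL limit v2 0 h with hblocks
      set Mrev := ((blocks.map (fun p => (p.2, e2, p.1))).reverse) with hMrev
      set rest := (levelsL limit (v2 * 2) (e2 + 1) (by omega)).flatMap
          (fun lv => ((lv.2).map (fun p => (p.2, lv.1, p.1))).reverse) with hrest
      set m := Mrev.length with hm
      set E := blocks.flatMap (fun p => (p.1, p.2, (1 : Int)) :: extEntries limit states p.1 p.2)
        with hE
      have htake : (T.take pLen).length = pLen := by
        rw [List.length_take]; omega
      have hTlen : T.length = pLen + m + rest.length := by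
        conv_lhs => rw [hsuffix]
        simp only [List.length_append, htake]
        omega
      have hpos : ∀ k, k < m → T.getD (pLen + k) (0, 0, 0) = Mrev.getD k (0, 0, 0) := by
        intro k hk
        conv_lhs => rw [hsuffix]
        rw [List.getD_append_right _ _ _ _ (by omega), htake]
        have hik : pLen + k - pLen = k := by omega
        rw [hik, List.getD_append _ _ _ _ (by omega)]
      have hMfacts : ∀ k, k < m → (Mrev.getD k (0, 0, 0)).2.1 = e2
          ∧ 1 < (Mrev.getD k (0, 0, 0)).1 ∧ (Mrev.getD k (0, 0, 0)).1 ≤ limit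
          ∧ ∃ p ∈ blocks, Mrev.getD k (0, 0, 0) = (p.2, e2, p.1) := by
        intro k hk
        have hmemM : Mrev.getD k (0, 0, 0) ∈ Mrev := by
          rw [List.getD_eq_getElem _ _ hk]
          exact List.getElem_mem _
        rw [hMrev, List.mem_reverse] at hmemM
        rcases List.mem_map.mp hmemM with ⟨p, hp, hpe⟩
        have hpb := blocksL_bounds limit v2 0 h p hp
        refine ⟨by rw [← hpe], by rw [← hpe]; show 1 < p.2; omega,
          by rw [← hpe]; show p.2 ≤ limit; omega, ⟨p, hp, hpe.symm⟩⟩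
      obtain ⟨c1, dpE', heq, hlenE, hprops, hclen, hcget⟩ :=
        levelStep limit T e2 pLen states dp0 hdp0 hprior hnds hnddp hdpb hmem hinv
          m (by omega) (by omega)
          (fun k hk1 hk2 => by
            have hx := hpos (k - pLen) (by omega)
            have hy := hMfacts (k - pLen) (by omega)
            rw [show k = pLen + (k - pLen) by omega, hx]
            exact ⟨hy.1, hy.2.1, hy.2.2.1⟩)
          m 0 (by omega) c [] rfl hc
      simp only [Nat.add_zero, List.append_nil] at heq hprops
      -- split A's remaining index range at the end of this level
      rw [PySem.List.pyRange_one_append (pLen : Int) ((pLen + m : Nat) : Int) (T.length : Int)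
        (by push_cast; omega) (by push_cast; omega), List.foldl_append, heq]
      -- unfold one step of B
      rw [altOuter_step limit v2 c states h hv2]
      have hEeq : altLevelEntries limit v2 0 states [] h = E := by
        rw [altLevelEntries_eq]; simp [hE, hblocks]
      rw [hEeq]
      rw [PySem.List.foldl_prod_mk
        (f := fun (c : List Int) (e : Int × Int × Int) =>
          PySem.List.pySetD c e.2.1 (PySem.List.pyGetD c e.2.1 0 + e.2.2))
        (g := fun (st : PySem.Dict Int (PySem.Dict Int Int)) (e : Int × Int × Int) =>
          st.modify e.1 PySem.Dict.empty (fun d => d.insert e.2.1 (d.getD e.2.1 0 + e.2.2)))]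
      -- entry bounds for B's counts update
      have hEb : ∀ e ∈ E, 2 ≤ e.2.1 ∧ e.2.1 ≤ limit :=
        entries_bounds limit v2 h states hnds hsb
      have hEmapb : ∀ p ∈ E.map (fun e : Int × Int × Int => e.2), 0 ≤ p.1 ∧ p.1 < (c.length : Int) := by
        intro p hp
        rcases List.mem_map.mp hp with ⟨e, he, rfl⟩
        have := hEb e he
        have : (c.length : Int) = limit + 1 := by rw [hc]; omega
        have := hEb e he
        omega
      have hBfold : E.foldl (fun (c : List Int) (e : Int × Int × Int) =>
            PySem.List.pySetD c e.2.1 (PySem.List.pyGetD c e.2.1 0 + e.2.2)) c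
          = (E.map (fun e : Int × Int × Int => e.2)).foldl (fun c p =>
            PySem.List.pySetD c p.1 (PySem.List.pyGetD c p.1 0 + p.2)) c := by
        rw [List.foldl_map]
      -- per-block mass equals the A-side node mass
      have hmassS : ∀ t : Int, massS E t
          = (blocks.map (fun p => nodeMass limit states p.2 p.1 t)).sum := by
        intro t
        rw [hE, massS, mass_flatMap]
        congr 1
        refine List.map_congr_left (fun p hp => ?_)
        exact entriesFor_mass limit states p.1 p.2 t hnds hndi
      -- the A-side level sum equals the same block sum
      have hAsum : ∀ t : Int,
          ((List.range m).map (fun r => (dpE'.getD r PySem.Dict.empty).getD t 0)).sum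
            = (blocks.map (fun p => nodeMass limit states p.2 p.1 t)).sum := by
        intro t
        have hstep1 : (List.range m).map (fun r => (dpE'.getD r PySem.Dict.empty).getD t 0)
            = (List.range m).map (fun r =>
                nodeMass limit states (Mrev.getD r (0, 0, 0)).1 (Mrev.getD r (0, 0, 0)).2.2 t) := by
          refine List.map_congr_left (fun r hr => ?_)
          rw [List.mem_range] at hr
          rw [(hprops r (by omega)).2.2 t, hpos r (by omega)]
        rw [hstep1, hm, sum_range_getD Mrev (0, 0, 0)
          (fun x => nodeMass limit states x.1 x.2.2 t)]
        rw [hMrev, List.map_reverse, List.sum_reverse, List.map_map]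
        rfl
      -- counts agree after the level
      have hceq : c1 = E.foldl (fun (c : List Int) (e : Int × Int × Int) =>
          PySem.List.pySetD c e.2.1 (PySem.List.pyGetD c e.2.1 0 + e.2.2)) c := by
        rw [hBfold]
        apply List.ext_getElem
        · rw [hclen, counts_fold_length]
        · intro i h1 h2
          have hic : i < c.length := by rw [hclen] at h1; exact h1
          rw [← List.getD_eq_getElem c1 0 h1, ← List.getD_eq_getElem _ 0 h2]
          rw [hcget i hic, counts_fold_getD _ c hEmapb i hic, massS_map_snd, hmassS, hAsum]
      rw [hceq]
      -- apply the induction hypothesis at the next level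
      refine ihn (v2 * 2) (e2 + 1) (by omega) (pLen + m) _ (dp0 ++ dpE') _
        (by omega) ?_ (by omega) (by rw [List.length_append, hdp0, hlenE]) ?_ ?_ ?_ ?_ ?_ ?_ ?_ ?_ ?_
      · -- suffix structure at pLen + m
        have htk : T.take (pLen + m) = T.take pLen ++ Mrev := by
          conv_lhs => rw [hsuffix]
          rw [List.take_append, List.take_take, min_comm, min_eq_left (by omega),
            htake, show pLen + m - pLen = m from by omega, hm, List.take_left]
        conv_lhs => rw [hsuffix]
        rw [htk, List.append_assoc]
      · -- counts length
        rw [← hceq, hclen, hc]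
      · -- prior levels below e2 + 1
        intro k hk
        by_cases hkp : k < pLen
        · have := hprior k hkp; omega
        · have hx := hpos (k - pLen) (by omega)
          have hy := (hMfacts (k - pLen) (by omega)).1
          rw [show k = pLen + (k - pLen) from by omega, hx]
          omega
      · -- outer keys nodup
        exact PySem.Dict.nodup_keys_foldl_modify_key E (fun e => e.1) PySem.Dict.empty
          (fun s e => fun d => d.insert e.2.1 (d.getD e.2.1 0 + e.2.2)) states hnds
      · -- inner dict keys nodup
        exact states_fold_inner_nodup E states hndi
      · -- dp dict keys nodup
        intro k hk
        by_cases hkp : k < pLen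
        · rw [List.getD_append _ _ _ _ (by omega)]; exact hnddp k hkp
        · rw [List.getD_append_right _ _ _ _ (by omega), hdp0]
          exact (hprops (k - pLen) (by omega)).1
      · -- dp dict key bounds
        intro k hk
        by_cases hkp : k < pLen
        · rw [List.getD_append _ _ _ _ (by omega)]; exact hdpb k hkp
        · rw [List.getD_append_right _ _ _ _ (by omega), hdp0]
          exact (hprops (k - pLen) (by omega)).2.1
      · -- states inner key bounds
        intro b s hs
        rcases states_fold_inner_keys E states b s hs with hold | ⟨e, heE, he1, he2⟩
        · exact hsb b s hold
        · have := hEb e heE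
          omega
      · -- processed exp3 values are keys of states
        intro k hk
        rw [PySem.Dict.keys_foldl_modify_key E (fun e => e.1) PySem.Dict.empty
          (fun s e => fun d => d.insert e.2.1 (d.getD e.2.1 0 + e.2.2)) states,
          PySem.Set.mem_update]
        by_cases hkp : k < pLen
        · exact Or.inl (hmem k hkp)
        · obtain ⟨p, hp, hpe⟩ := (hMfacts (k - pLen) (by omega)).2.2.2
          rw [show k = pLen + (k - pLen) from by omega, hpos (k - pLen) (by omega), hpe]
          right
          refine List.mem_map.mpr ⟨(p.1, p.2, (1 : Int)), ?_, rfl⟩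
          rw [hE]
          exact List.mem_flatMap.mpr ⟨p, hp, by simp⟩
      · -- the states invariant
        intro bp u
        rw [states_fold_getD E states bp u]
        have hmE : massE E bp u
            = (blocks.map (fun p => if p.1 = bp then nodeMass limit states p.2 p.1 u else 0)).sum := by
          rw [hE, massE, mass_flatMap]
          congr 1
          refine List.map_congr_left (fun p hp => ?_)
          show massE ((p.1, p.2, (1 : Int)) :: extEntries limit states p.1 p.2) bp u = _
          rw [massE_const_fst _ p.1 (entriesFor_fst limit states p.1 p.2) bp u,
            entriesFor_mass limit states p.1 p.2 u hnds hndi]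
        have hpart2 : ((PySem.List.pyRange (pLen : Int) ((pLen + m : Nat) : Int) 1).map (fun i =>
              if (T.getD i.toNat (0, 0, 0)).2.2 = bp
              then ((dp0 ++ dpE').getD i.toNat PySem.Dict.empty).getD u 0 else 0)).sum
            = (blocks.map (fun p => if p.1 = bp then nodeMass limit states p.2 p.1 u else 0)).sum := by
          rw [PySem.List.pyRange_one, show (((pLen + m : Nat) : Int) - (pLen : Int)).toNat = m
            from by omega, List.map_map]
          have hcongr2 : ∀ k ∈ List.range m,
              ((fun i => if (T.getD i.toNat (0, 0, 0)).2.2 = bp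
                then ((dp0 ++ dpE').getD i.toNat PySem.Dict.empty).getD u 0 else 0) ∘
                  (fun k : Nat => (pLen : Int) + (k : Int))) k
              = (fun x : Int × Int × Int => if x.2.2 = bp
                  then nodeMass limit states x.1 x.2.2 u else 0) (Mrev.getD k (0, 0, 0)) := by
            intro k hk
            rw [List.mem_range] at hk
            simp only [Function.comp_apply]
            rw [show ((pLen : Int) + (k : Int)).toNat = pLen + k from by omega]
            rw [List.getD_append_right _ _ _ _ (by omega), hdp0,
              show pLen + k - pLen = k from by omega]
            rw [(hprops k (by omega)).2.2 u, hpos k (by omega)]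
          rw [List.map_congr_left hcongr2]
          rw [sum_range_getD Mrev (0, 0, 0) (fun x => if x.2.2 = bp
            then nodeMass limit states x.1 x.2.2 u else 0)]
          rw [hMrev, List.map_reverse, List.sum_reverse, List.map_map]
          rfl
        rw [PySem.List.pyRange_one_append 0 (pLen : Int) ((pLen + m : Nat) : Int)
          (by positivity) (by push_cast; omega), List.map_append, List.sum_append]
        rw [hmE, hpart2]
        congr 1
        rw [hinv bp u]
        congr 1
        refine List.map_congr_left (fun i hi => ?_)
        rw [PySem.List.mem_pyRange_one] at hi
        rw [List.getD_append _ _ _ _ (by omega)]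


theorem blocksL_nil_of_le_one (limit v b : Int) (h : 0 < v) (hlim : limit ≤ 1) :
    blocksL limit v b h = [] := by
  fun_induction blocksL limit v b h with
  | case1 v b h hle ih =>
    rw [ih, if_neg (by omega : ¬ 1 < v)]
    simp
  | case2 => rfl

theorem levelsL_snd_nil (limit v2 e2 : Int) (h : 0 < v2) (hlim : limit ≤ 1) :
    ∀ lv ∈ levelsL limit v2 e2 h, lv.2 = [] := by
  fun_induction levelsL limit v2 e2 h with
  | case1 v2 e2 h hle ih =>
    intro lv hlv
    rcases List.mem_cons.mp hlv with rfl | hlv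
    · exact blocksL_nil_of_le_one limit v2 0 h hlim
    · exact ih lv hlv
  | case2 => simp

theorem generate_terms_nil (limit : Int) (hlim : limit ≤ 1) : generate_terms limit = [] := by
  have hout : genTermsOuter limit 1 0 [] one_pos = [] := by
    rw [genTermsOuter_eq]
    simp only [List.nil_append]
    rw [List.flatMap_eq_nil_iff]
    intro lv hlv
    rw [levelsL_snd_nil limit 1 0 one_pos hlim lv hlv]
    rfl
  rw [generate_terms, hout]
  rfl

theorem alt_small (limit : Int) (hlim : limit ≤ 1) :
    enumerate_special_sums_alt limit = List.replicate (limit + 1).toNat 0 := by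
  rw [enumerate_special_sums_alt]
  by_cases h1 : (1 : Int) ≤ limit
  · rw [altOuter_step limit 1 _ _ one_pos h1]
    have hent : altLevelEntries limit 1 0 PySem.Dict.empty [] one_pos = [] := by
      rw [altLevelEntries_eq, blocksL_nil_of_le_one limit 1 0 one_pos hlim]
      rfl
    rw [hent]
    rw [altOuter, dif_neg (by omega : ¬ (1 : Int) * 2 ≤ limit)]
    rfl
  · rw [altOuter, dif_neg h1]

theorem terms_ne_nil (limit : Int) (hlim : 2 ≤ limit) (hdom : limit ≤ 2147483648) :
    generate_terms limit ≠ [] := by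
  rw [generate_terms_eq limit hdom]
  have hlv2 : ((1 : Int), blocksL limit 2 0 (by omega)) ∈ levelsL limit 1 0 one_pos := by
    rw [levelsL, dif_pos (by omega : (1 : Int) ≤ limit)]
    rw [levelsL]
    rw [dif_pos (by omega : (1 : Int) * 2 ≤ limit)]
    refine List.mem_cons.mpr (Or.inr (List.mem_cons.mpr (Or.inl ?_)))
    norm_num
  have hb : ((0 : Int), (2 : Int)) ∈ blocksL limit 2 0 (by omega) := by
    rw [blocksL, dif_pos (by omega : (2 : Int) ≤ limit), if_pos (by norm_num : (1 : Int) < 2)]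
    simp
  have hmem : ((2 : Int), (1 : Int), (0 : Int)) ∈ termTarget limit := by
    rw [termTarget]
    refine List.mem_flatMap.mpr ⟨((1 : Int), blocksL limit 2 0 (by omega)), hlv2, ?_⟩
    rw [List.mem_reverse]
    exact List.mem_map.mpr ⟨((0 : Int), (2 : Int)), hb, rfl⟩
  exact List.ne_nil_of_mem hmem

-- ===== VERDICT (by name: the statement is the Claim_ definition above) =====
theorem enumerate_special_sums_spec : Claim_equal_enumerate_special_sums := by
  unfold Claim_equal_enumerate_special_sums Spec_enumerate_special_sums
  intro limit hdom
  unfold Dom_enumerate_special_sums pvDomInt at hdom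
  rw [decide_eq_true_eq] at hdom
  by_cases hlim : limit ≤ 1
  · rw [enum_A_eq limit, if_pos (generate_terms_nil limit hlim), alt_small limit hlim]
  · have hne := terms_ne_nil limit (by omega) (by omega)
    rw [enum_A_eq limit, if_neg hne]
    rw [enumerate_special_sums_alt]
    have hsuffix : generate_terms limit
        = (generate_terms limit).take 0 ++ (levelsL limit 1 0 one_pos).flatMap
            (fun lv => ((lv.2).map (fun p => (p.2, lv.1, p.1))).reverse) := by
      rw [List.take_zero, List.nil_append]
      exact generate_terms_eq limit (by omega)
    have hmain := mainAlign limit (generate_terms limit) (limit + 1 - 1).toNat 1 0 one_pos 0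
      (List.replicate (limit + 1).toNat 0) [] PySem.Dict.empty
      le_rfl hsuffix (Nat.zero_le _) rfl (by simp)
      (fun k hk => absurd hk (Nat.not_lt_zero k))
      (by simp [PySem.Dict.keys_empty])
      (fun b => by simp [PySem.Dict.getD_empty, PySem.Dict.keys_empty])
      (fun k hk => absurd hk (Nat.not_lt_zero k))
      (fun k hk => absurd hk (Nat.not_lt_zero k))
      (fun b s hs => by simp [PySem.Dict.getD_empty, PySem.Dict.keys_empty] at hs)
      (fun k hk => absurd hk (Nat.not_lt_zero k))
      (fun bp u => by
        rw [PySem.List.pyRange_one_eq_nil (by norm_num)]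
        simp [PySem.Dict.getD_empty])
    rw [PySem.List.len_eq]
    exact_mod_cast hmain
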